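-- pv_equiv track=rewrite | github.com/ChenfengZhao/GlycanDIAFinder | generate_glycan_ions.py | parse_nested_structure
-- ===== SOURCE A (Python) =====
-- from collections import defaultdict
--
-- ATOM_MAPPING = {
--     "H": {"C": 6, "H": 10, "O": 5, "N": 0},
--     "Q": {"C": 6, "H": 10, "O": 5, "N": 0},
--     "N": {"C": 8, "H": 13, "O": 5, "N": 1},
--     "J": {"C": 8, "H": 13, "O": 5, "N": 1},
--     "F": {"C": 6, "H": 10, "O": 4, "N": 0},
--     "A": {"C": 11, "H": 17, "O": 8, "N": 1},
--     "G": {"C": 11, "H": 17, "O": 9, "N": 1},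
--     "X": {"C": 5, "H": 8, "O": 4, "N": 0},
-- }
--
-- def parse_nested_structure(structure):
--     """
--     Parse the  molecular formula structure and return the total count of each atom.
--     """
--     stack = []
--     current_atoms = defaultdict(int)
--     i = 0
--
--     while i < len(structure):
--         char = structure[i]
--
--         if char in ATOM_MAPPING:
--             for atom, count in ATOM_MAPPING[char].items():
--                 current_atoms[atom] += count
--
--         elif char == '(':
--             stack.append(current_atoms)
--             current_atoms = defaultdict(int)
--
--         elif char == ')':
--             nested_atoms = current_atoms
--             current_atoms = stack.pop()
--             for atom, count in nested_atoms.items():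
--                 current_atoms[atom] += count
--
--         i += 1
--
--     return current_atoms
-- ===== SOURCE B (Python) =====
-- from collections import defaultdict
--
-- ATOM_MAPPING = {
--     "H": {"C": 6, "H": 10, "O": 5, "N": 0},
--     "Q": {"C": 6, "H": 10, "O": 5, "N": 0},
--     "N": {"C": 8, "H": 13, "O": 5, "N": 1},
--     "J": {"C": 8, "H": 13, "O": 5, "N": 1},
--     "F": {"C": 6, "H": 10, "O": 4, "N": 0},
--     "A": {"C": 11, "H": 17, "O": 8, "N": 1},
--     "G": {"C": 11, "H": 17, "O": 9, "N": 1},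
--     "X": {"C": 5, "H": 8, "O": 4, "N": 0},
-- }
--
-- def parse_nested_structure(structure):
--     """
--     Parse the molecular formula structure and return the total count of each atom.
--     Parentheses carry no multipliers, so every recognised symbol contributes its
--     atoms exactly once: tally each symbol with str.count and multiply.
--     """
--     result = defaultdict(int)
--     for symbol, atoms in ATOM_MAPPING.items():
--         n = structure.count(symbol)
--         if n:
--             for atom, cnt in atoms.items():
--                 result[atom] += cnt * n
--     return result
-- ===== Notes on version B (the rewrite author's own statement) =====
-- stated objective: faster
-- what changed: Replaces A's per-character defaultdict accumulation with a parenthesis stack by a single pass per symbol: eight C-level str.count tallies multiplied by each symbol's atom quadruple (parentheses carry no multiplier, so the stack is dropped).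
-- intended difference: On strings where an unmatched '(' is preceded by a glycan symbol, A silently discards the atoms accumulated before that '(' (its stack abandons the outer accumulator, e.g. 'H(' -> {}), while B returns the tally of every symbol in the string ({'C':6,'H':10,'O':5,'N':0}), the intended total for a formula whose parentheses carry no multiplier. — e.g. on parse_nested_structure("H("): A returns [], B returns [("C", 6), ("H", 10), ("O", 5), ("N", 0)]
import Mathlib
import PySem

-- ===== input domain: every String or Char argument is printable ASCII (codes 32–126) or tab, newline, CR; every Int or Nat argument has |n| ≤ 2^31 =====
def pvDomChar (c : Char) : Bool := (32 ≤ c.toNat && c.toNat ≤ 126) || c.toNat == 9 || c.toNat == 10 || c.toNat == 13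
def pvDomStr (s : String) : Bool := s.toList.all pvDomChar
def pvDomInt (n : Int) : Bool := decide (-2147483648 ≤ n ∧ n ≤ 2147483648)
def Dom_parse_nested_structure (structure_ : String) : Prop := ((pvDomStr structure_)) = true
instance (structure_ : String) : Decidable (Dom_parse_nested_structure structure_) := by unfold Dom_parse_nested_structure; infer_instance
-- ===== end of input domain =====

-- B replaces A's per-character defaultdict accumulation + parenthesis stack by eight
-- C-level str.count tallies (parentheses carry no multiplier, so each symbol counts once);
-- objective: faster (constant-factor).  A's quirk on unmatched '(' is stated as D_ below.

-- ===== PORT A =====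
def pvAtomMapping : PySem.Dict Char (List (String × Int)) :=
  PySem.Dict.mk
    [('H', [("C", 6), ("H", 10), ("O", 5), ("N", 0)]),
     ('Q', [("C", 6), ("H", 10), ("O", 5), ("N", 0)]),
     ('N', [("C", 8), ("H", 13), ("O", 5), ("N", 1)]),
     ('J', [("C", 8), ("H", 13), ("O", 5), ("N", 1)]),
     ('F', [("C", 6), ("H", 10), ("O", 4), ("N", 0)]),
     ('A', [("C", 11), ("H", 17), ("O", 8), ("N", 1)]),
     ('G', [("C", 11), ("H", 17), ("O", 9), ("N", 1)]),
     ('X', [("C", 5), ("H", 8), ("O", 4), ("N", 0)])]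

-- current_atoms[atom] += count, looped over an items list (defaultdict(int) lookup = getD 0)
def pvAddAtoms (cur : PySem.Dict String Int) (items : List (String × Int)) : PySem.Dict String Int :=
  items.foldl (fun d p => d.insert p.1 (d.getD p.1 0 + p.2)) cur

-- the while-loop of A: stack of saved dicts, current accumulator; none = IndexError on ')' with empty stack
def pvLoopA : List Char → List (PySem.Dict String Int) → PySem.Dict String Int →
    Option (PySem.Dict String Int)
  | [], _, cur => some cur
  | c :: rest, stack, cur =>
    match pvAtomMapping.get? c with
    | some items => pvLoopA rest stack (pvAddAtoms cur items)
    | none =>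
      if c = '(' then pvLoopA rest (cur :: stack) PySem.Dict.empty
      else if c = ')' then
        match stack with
        | [] => none
        | top :: ts => pvLoopA rest ts (pvAddAtoms top cur.items)
      else pvLoopA rest stack cur

def parse_nested_structure (structure_ : String) : List (String × Int) :=
  match pvLoopA structure_.toList [] PySem.Dict.empty with
  | some d => d.items
  | none => []   -- unreachable under Pre_ (Python raises IndexError here)

-- ===== PORT B =====
def pvBMapping : List (String × List (String × Int)) :=
  [("H", [("C", 6), ("H", 10), ("O", 5), ("N", 0)]),
   ("Q", [("C", 6), ("H", 10), ("O", 5), ("N", 0)]),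
   ("N", [("C", 8), ("H", 13), ("O", 5), ("N", 1)]),
   ("J", [("C", 8), ("H", 13), ("O", 5), ("N", 1)]),
   ("F", [("C", 6), ("H", 10), ("O", 4), ("N", 0)]),
   ("A", [("C", 11), ("H", 17), ("O", 8), ("N", 1)]),
   ("G", [("C", 11), ("H", 17), ("O", 9), ("N", 1)]),
   ("X", [("C", 5), ("H", 8), ("O", 4), ("N", 0)])]

def parse_nested_structure_alt (structure_ : String) : List (String × Int) :=
  (pvBMapping.foldl
    (fun res sa =>
      let n : Int := (PySem.Str.count structure_ sa.1 : Int)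
      if n ≠ 0 then
        sa.2.foldl (fun d p => d.insert p.1 (d.getD p.1 0 + p.2 * n)) res
      else res)
    PySem.Dict.empty).items

-- ===== PRECONDITION & SPEC =====
-- Pre_ excludes exactly the inputs where A raises IndexError: a ')' with no '(' left to pop,
-- i.e. some prefix with more ')' than '('.
def Pre_parse_nested_structure (structure_ : String) : Prop :=
  ∀ p ∈ structure_.toList.inits, p.count ')' ≤ p.count '('
instance (structure_ : String) : Decidable (Pre_parse_nested_structure structure_) := by
  unfold Pre_parse_nested_structure; infer_instance

def pvWitness_parse_nested_structure : String := "H(N)"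

def pvMapped (c : Char) : Bool := ['H', 'Q', 'N', 'J', 'F', 'A', 'G', 'X'].contains c

-- a '(' followed by r is never closed iff no prefix of r has more ')' than '('
def pvNeverClosed (r : List Char) : Bool := decide (∀ p ∈ r.inits, p.count ')' ≤ p.count '(')

def pvGoD : List Char → Bool → Bool
  | [], _ => false
  | c :: r, seen => (c == '(' && seen && pvNeverClosed r) || pvGoD r (seen || pvMapped c)

-- On strings where an unmatched '(' is preceded by a glycan symbol, A silently discards the
-- atoms accumulated before that '(' (its stack bookkeeping abandons the outer accumulator)
-- and returns only the atoms counted after it, while B returns the tally of every symbol in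
-- the string — the intended total for a formula without multipliers.
def D_parse_nested_structure (structure_ : String) : Prop :=
  pvGoD structure_.toList false = true
instance (structure_ : String) : Decidable (D_parse_nested_structure structure_) := by
  unfold D_parse_nested_structure; infer_instance

def Spec_parse_nested_structure (structure_ : String) (out : List (String × Int)) : Prop :=
  ¬ D_parse_nested_structure structure_ → out = parse_nested_structure_alt structure_
instance (structure_ : String) (out : List (String × Int)) : Decidable (Spec_parse_nested_structure structure_ out) := by
  unfold Spec_parse_nested_structure; infer_instance

def pvDiffWitness_parse_nested_structure : String := "H("
def pvDiffWitnessOut_parse_nested_structure : (List (String × Int)) × (List (String × Int)) :=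
  ([], [("C", 6), ("H", 10), ("O", 5), ("N", 0)])

-- ===== CLAIM (what is proved, stated in full; the proofs are below) =====
def Claim_unchanged_parse_nested_structure : Prop := ∀ (structure_ : String), Dom_parse_nested_structure structure_ → Pre_parse_nested_structure structure_ → Spec_parse_nested_structure structure_ (parse_nested_structure structure_)
def Claim_changed_parse_nested_structure : Prop := Dom_parse_nested_structure (pvDiffWitness_parse_nested_structure) ∧ Pre_parse_nested_structure (pvDiffWitness_parse_nested_structure) ∧ D_parse_nested_structure (pvDiffWitness_parse_nested_structure) ∧ parse_nested_structure (pvDiffWitness_parse_nested_structure) = pvDiffWitnessOut_parse_nested_structure.1 ∧ parse_nested_structure_alt (pvDiffWitness_parse_nested_structure) = pvDiffWitnessOut_parse_nested_structure.2 ∧ pvDiffWitnessOut_parse_nested_structure.1 ≠ pvDiffWitnessOut_parse_nested_structure.2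
def Claim_exact_parse_nested_structure : Prop := ∀ (structure_ : String), Dom_parse_nested_structure structure_ → Pre_parse_nested_structure structure_ → D_parse_nested_structure structure_ → parse_nested_structure structure_ ≠ parse_nested_structure_alt structure_

-- ===== LEMMAS AND PROOFS =====

-- abstract values: an optional quadruple of atom counts (C, H, O, N); none = empty defaultdict
def pvQadd (a b : Int × Int × Int × Int) : Int × Int × Int × Int :=
  (a.1 + b.1, a.2.1 + b.2.1, a.2.2.1 + b.2.2.1, a.2.2.2 + b.2.2.2)
def pvQzero : Int × Int × Int × Int := (0, 0, 0, 0)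
def pvQsmul (n : Int) (y : Int × Int × Int × Int) : Int × Int × Int × Int :=
  (y.1 * n, y.2.1 * n, y.2.2.1 * n, y.2.2.2 * n)

def pvComb : Option (Int × Int × Int × Int) → Option (Int × Int × Int × Int) → Option (Int × Int × Int × Int)
  | none, none => none
  | none, some b => some b
  | some a, none => some a
  | some a, some b => some (pvQadd a b)

def pvWgt (c : Char) : Option (Int × Int × Int × Int) :=
  if c = 'H' ∨ c = 'Q' then some (6, 10, 5, 0)
  else if c = 'N' ∨ c = 'J' then some (8, 13, 5, 1)
  else if c = 'F' then some (6, 10, 4, 0)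
  else if c = 'A' then some (11, 17, 8, 1)
  else if c = 'G' then some (11, 17, 9, 1)
  else if c = 'X' then some (5, 8, 4, 0)
  else none

def pvItemsOf (y : Int × Int × Int × Int) : List (String × Int) :=
  [("C", y.1), ("H", y.2.1), ("O", y.2.2.1), ("N", y.2.2.2)]

def pvEnc : Option (Int × Int × Int × Int) → PySem.Dict String Int
  | none => PySem.Dict.empty
  | some y => PySem.Dict.mk (pvItemsOf y)

def pvPops : List Char → Nat
  | [] => 0
  | c :: r => if c = '(' then pvPops r - 1 else if c = ')' then pvPops r + 1 else pvPops r

def pvHU : List Char → Bool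
  | [] => false
  | c :: r => (c == '(' && pvPops r == 0) || pvHU r

def pvTot : List Char → Option (Int × Int × Int × Int)
  | [] => none
  | c :: r => pvComb (pvWgt c) (pvTot r)

def pvReg : List Char → List Char
  | [] => []
  | c :: r => if pvHU r then pvReg r else if c == '(' && pvPops r == 0 then r else c :: r

def pvG : List Char → List (Option (Int × Int × Int × Int)) → Option (Int × Int × Int × Int) →
    Option (Option (Int × Int × Int × Int))
  | [], _, cur => some cur
  | c :: r, st, cur =>
    match pvWgt c with
    | some y => pvG r st (pvComb cur (some y))
    | none =>
      if c = '(' then pvG r (cur :: st) none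
      else if c = ')' then
        match st with
        | [] => none
        | t :: ts => pvG r ts (pvComb t cur)
      else pvG r st cur

def pvSfold (l : List (Option (Int × Int × Int × Int))) : Option (Int × Int × Int × Int) :=
  l.foldr pvComb none

theorem pvComb_none_right (x : Option (Int × Int × Int × Int)) : pvComb x none = x := by
  cases x <;> rfl

theorem pvQadd_comm (a b : Int × Int × Int × Int) : pvQadd a b = pvQadd b a := by
  simp [pvQadd]; refine ⟨by ring, by ring, by ring, by ring⟩

theorem pvQadd_assoc (a b c : Int × Int × Int × Int) :
    pvQadd (pvQadd a b) c = pvQadd a (pvQadd b c) := by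
  simp [pvQadd]; refine ⟨by ring, by ring, by ring, by ring⟩

theorem pvComb_comm (a b : Option (Int × Int × Int × Int)) : pvComb a b = pvComb b a := by
  cases a <;> cases b <;> simp [pvComb, pvQadd_comm]

theorem pvComb_assoc (a b c : Option (Int × Int × Int × Int)) :
    pvComb (pvComb a b) c = pvComb a (pvComb b c) := by
  cases a <;> cases b <;> cases c <;> simp [pvComb, pvQadd_assoc]

theorem pvComb_some_right (cur : Option (Int × Int × Int × Int)) (y : Int × Int × Int × Int) :
    pvComb cur (some y) = some (pvQadd (cur.getD pvQzero) y) := by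
  cases cur <;> simp [pvComb, pvQadd, pvQzero]

-- the four-item accumulation loop of A on an encoded state
theorem pvAddA (q : Option (Int × Int × Int × Int)) (y : Int × Int × Int × Int) :
    pvAddAtoms (pvEnc q) (pvItemsOf y) = pvEnc (some (pvQadd (q.getD pvQzero) y)) := by
  obtain ⟨y1, y2, y3, y4⟩ := y
  cases q with
  | none =>
    simp [pvAddAtoms, pvItemsOf, pvEnc, pvQadd, pvQzero, PySem.Dict.insert, PySem.Dict.getD,
      PySem.Dict.get?, PySem.Dict.contains, PySem.Dict.empty, List.foldl]
  | some q0 =>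
    obtain ⟨a, b, c, d⟩ := q0
    simp [pvAddAtoms, pvItemsOf, pvEnc, pvQadd, pvQzero, PySem.Dict.insert, PySem.Dict.getD,
      PySem.Dict.get?, PySem.Dict.contains, List.foldl]

theorem pvLookup (c : Char) : pvAtomMapping.get? c = (pvWgt c).map pvItemsOf := by
  by_cases h1 : c = 'H'; · subst h1; decide
  by_cases h2 : c = 'Q'; · subst h2; decide
  by_cases h3 : c = 'N'; · subst h3; decide
  by_cases h4 : c = 'J'; · subst h4; decide
  by_cases h5 : c = 'F'; · subst h5; decide
  by_cases h6 : c = 'A'; · subst h6; decide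
  by_cases h7 : c = 'G'; · subst h7; decide
  by_cases h8 : c = 'X'; · subst h8; decide
  have hw : pvWgt c = none := by simp [pvWgt, h1, h2, h3, h4, h5, h6, h7, h8]
  rw [hw]
  simp only [pvAtomMapping, PySem.Dict.get?_mk_cons, beq_iff_eq]
  rw [if_neg (fun h => h1 h.symm), if_neg (fun h => h2 h.symm), if_neg (fun h => h3 h.symm),
      if_neg (fun h => h4 h.symm), if_neg (fun h => h5 h.symm), if_neg (fun h => h6 h.symm),
      if_neg (fun h => h7 h.symm), if_neg (fun h => h8 h.symm)]
  rfl

-- bridge: the real loop is the abstract loop on encoded states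
theorem pvEnc_comb_some (cur : Option (Int × Int × Int × Int)) (y : Int × Int × Int × Int) :
    pvEnc (some (pvQadd (cur.getD pvQzero) y)) = pvEnc (pvComb cur (some y)) := by
  rw [pvComb_some_right]

theorem pvBridge (cs : List Char) : ∀ (st : List (Option (Int × Int × Int × Int))) cur,
    pvLoopA cs (st.map pvEnc) (pvEnc cur) = (pvG cs st cur).map pvEnc := by
  induction cs with
  | nil => intro st cur; rfl
  | cons c r ih =>
    intro st cur
    simp only [pvLoopA, pvG]
    rw [pvLookup c]
    cases hw : pvWgt c with
    | some y =>
      simp only [Option.map_some]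
      rw [pvAddA, pvEnc_comb_some, ih]
    | none =>
      simp only [Option.map_none]
      by_cases hp : c = '('
      · simp only [if_pos hp]
        have : PySem.Dict.empty = pvEnc none := rfl
        rw [this]
        have hst : (pvEnc cur :: st.map pvEnc) = ((cur :: st).map pvEnc) := rfl
        rw [hst, ih]
      · by_cases hq : c = ')'
        · simp only [if_neg hp, if_pos hq]
          cases st with
          | nil => rfl
          | cons t ts =>
            simp only [List.map_cons]
            cases cur with
            | none =>
              have h1 : (pvEnc none).items = [] := rfl
              have h2 : pvAddAtoms (pvEnc t) [] = pvEnc t := rfl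
              rw [h1, h2, ih, pvComb_none_right]
            | some y =>
              have h1 : (pvEnc (some y)).items = pvItemsOf y := rfl
              rw [h1, pvAddA, pvEnc_comb_some, ih]
        · simp only [if_neg hp, if_neg hq]
          exact ih st cur

-- full characterisation of the abstract loop
theorem pvComb_none_left (x : Option (Int × Int × Int × Int)) : pvComb none x = x := by
  cases x <;> rfl

theorem pvComb_shuffle (a b s t : Option (Int × Int × Int × Int)) :
    pvComb (pvComb (pvComb a b) s) t = pvComb (pvComb a s) (pvComb b t) := by
  calc pvComb (pvComb (pvComb a b) s) t
      = pvComb (pvComb a (pvComb b s)) t := by rw [pvComb_assoc a b s]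
    _ = pvComb (pvComb a (pvComb s b)) t := by rw [pvComb_comm b s]
    _ = pvComb (pvComb (pvComb a s) b) t := by rw [pvComb_assoc a s b]
    _ = pvComb (pvComb a s) (pvComb b t) := by rw [pvComb_assoc]

theorem pvComb_rot (t cur x : Option (Int × Int × Int × Int)) :
    pvComb (pvComb t cur) x = pvComb cur (pvComb t x) := by
  rw [pvComb_comm t cur, pvComb_assoc]

theorem pvSfold_cons (a : Option (Int × Int × Int × Int)) (l) :
    pvSfold (a :: l) = pvComb a (pvSfold l) := rfl

theorem pvMain (cs : List Char) : ∀ (st : List (Option (Int × Int × Int × Int))) cur,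
    pvPops cs ≤ st.length →
    pvG cs st cur = some (if pvHU cs then pvTot (pvReg cs)
      else pvComb (pvSfold ((cur :: st).take (pvPops cs + 1))) (pvTot cs)) := by
  induction cs with
  | nil =>
    intro st cur _
    simp [pvG, pvHU, pvPops, pvTot, pvReg, pvSfold, pvComb_none_right]
  | cons c r ih =>
    intro st cur h
    simp only [pvG]
    cases hw : pvWgt c with
    | some y =>
      dsimp only
      have hp : c ≠ '(' := by
        rintro rfl; rw [show pvWgt '(' = none from by decide] at hw; cases hw
      have hq : c ≠ ')' := by
        rintro rfl; rw [show pvWgt ')' = none from by decide] at hw; cases hw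
      have hpops : pvPops (c :: r) = pvPops r := by simp [pvPops, hp, hq]
      have hhu : pvHU (c :: r) = pvHU r := by simp [pvHU, hp]
      have htot : pvTot (c :: r) = pvComb (some y) (pvTot r) := by simp [pvTot, hw]
      rw [ih st (pvComb cur (some y)) (by rw [hpops] at h; exact h)]
      by_cases hu : pvHU r
      · have hreg : pvReg (c :: r) = pvReg r := by simp [pvReg, hu]
        rw [hhu, hreg]; simp [hu]
      · rw [hhu, hpops, htot]; simp only [hu, if_false, Bool.false_eq_true]
        rw [List.take_succ_cons, List.take_succ_cons, pvSfold_cons, pvSfold_cons]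
        exact congrArg some (pvComb_shuffle cur (some y) _ _)
    | none =>
      dsimp only
      by_cases hp : c = '('
      · subst hp
        rw [if_pos rfl]
        have hpops : pvPops ('(' :: r) = pvPops r - 1 := by simp [pvPops]
        have h' : pvPops r ≤ (cur :: st).length := by
          rw [hpops] at h; simp only [List.length_cons]; omega
        rw [ih (cur :: st) none h']
        by_cases hu : pvHU r
        · have hhu : pvHU ('(' :: r) = true := by simp [pvHU, hu]
          have hreg : pvReg ('(' :: r) = pvReg r := by simp [pvReg, hu]
          rw [hhu, hreg]; simp [hu]
        · by_cases hz : pvPops r = 0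
          · have hhu : pvHU ('(' :: r) = true := by simp [pvHU, hz]
            have hreg : pvReg ('(' :: r) = r := by simp [pvReg, hu, hz]
            rw [hhu, hreg]; simp only [hu, if_false, if_true, Bool.false_eq_true, hz]
            simp [pvSfold, pvComb_none_left]
          · have hhu : pvHU ('(' :: r) = false := by simp [pvHU, hu, hz]
            have htot : pvTot ('(' :: r) = pvTot r := by
              have hwp : pvWgt '(' = none := by decide
              simp [pvTot, hwp, pvComb_none_left]
            rw [hhu, hpops, htot]; simp only [hu, if_false, Bool.false_eq_true]
            have h1 : pvPops r - 1 + 1 = pvPops r := by omega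
            rw [h1, List.take_succ_cons, pvSfold_cons, pvComb_none_left]
      · by_cases hq : c = ')'
        · subst hq
          rw [if_neg hp, if_pos rfl]
          have hpops : pvPops (')' :: r) = pvPops r + 1 := by simp [pvPops]
          rw [hpops] at h
          cases st with
          | nil => simp at h
          | cons t ts =>
            dsimp only
            rw [ih ts (pvComb t cur) (by simp at h; omega)]
            have hhu : pvHU (')' :: r) = pvHU r := by simp [pvHU]
            by_cases hu : pvHU r
            · have hreg : pvReg (')' :: r) = pvReg r := by simp [pvReg, hu]
              rw [hhu, hreg]; simp [hu]
            · have htot : pvTot (')' :: r) = pvTot r := by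
                have hwp : pvWgt ')' = none := by decide
                simp [pvTot, hwp, pvComb_none_left]
              rw [hhu, hpops, htot]; simp only [hu, if_false, Bool.false_eq_true]
              rw [List.take_succ_cons, List.take_succ_cons, List.take_succ_cons,
                pvSfold_cons, pvSfold_cons, pvSfold_cons]
              exact congrArg some (congrArg (fun z => pvComb z (pvTot r)) (pvComb_rot t cur _))
        · rw [if_neg hp, if_neg hq]
          have hpops : pvPops (c :: r) = pvPops r := by simp [pvPops, hp, hq]
          have hhu : pvHU (c :: r) = pvHU r := by simp [pvHU, hp]
          have htot : pvTot (c :: r) = pvTot r := by simp [pvTot, hw, pvComb_none_left]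
          rw [ih st cur (by rw [hpops] at h; exact h)]
          by_cases hu : pvHU r
          · have hreg : pvReg (c :: r) = pvReg r := by simp [pvReg, hu]
            rw [hhu, hreg]; simp [hu]
          · rw [hhu, hpops, htot]; simp only [hu, if_false, Bool.false_eq_true]

theorem pvPP (cs : List Char) : ∀ (k : Int),
    ((pvPops cs : Int) ≤ k) ↔ ∀ p ∈ cs.inits, ((p.count ')' : Int) - p.count '(' ≤ k) := by
  induction cs with
  | nil => intro k; simp [pvPops]
  | cons c r ih =>
    intro k
    rw [List.inits_cons]
    simp only [List.mem_cons, List.mem_map, forall_eq_or_imp, forall_exists_index, and_imp,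
      forall_apply_eq_imp_iff₂]
    have hcnt : ∀ (p : List Char) (x : Char), (c :: p).count x = p.count x + if c == x then 1 else 0 := by
      intro p x; rw [List.count_cons]
    by_cases hp : c = '('
    · subst hp
      simp only [hcnt]
      have h2 : ∀ p : List Char, ((p.count ')' + if '(' == ')' then 1 else 0 : Nat) : Int)
          - ((p.count '(' + if '(' == '(' then 1 else 0 : Nat) : Int)
          = (p.count ')' : Int) - p.count '(' - 1 := by intro p; push_cast; simp; ring
      simp only [h2]
      have hpops : pvPops ('(' :: r) = pvPops r - 1 := by simp [pvPops]
      rw [hpops]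
      have := ih (k + 1)
      constructor
      · intro h
        have h0 : (0:Int) ≤ k := by omega
        refine ⟨by simpa using h0, fun p hp => ?_⟩
        have := (this.1 (by omega)) p hp
        omega
      · rintro ⟨h0, hall⟩
        simp only [List.count_nil, Nat.cast_zero] at h0
        have : (pvPops r : Int) ≤ k + 1 := this.2 (fun p hp => by have := hall p hp; omega)
        omega
    · by_cases hq : c = ')'
      · subst hq
        simp only [hcnt]
        have hpops : pvPops (')' :: r) = pvPops r + 1 := by simp [pvPops]
        rw [hpops]
        have h2 : ∀ p : List Char, ((p.count ')' + if ')' == ')' then 1 else 0 : Nat) : Int)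
            - ((p.count '(' + if ')' == '(' then 1 else 0 : Nat) : Int)
            = (p.count ')' : Int) - p.count '(' + 1 := by intro p; push_cast; simp; ring
        simp only [h2]
        have := ih (k - 1)
        constructor
        · intro h
          refine ⟨by simpa using (by omega : (0:Int) ≤ k), fun p hp => ?_⟩
          have := this.1 (by omega) p hp
          omega
        · rintro ⟨h0, hall⟩
          have : (pvPops r : Int) ≤ k - 1 := this.2 (fun p hp => by have := hall p hp; omega)
          omega
      · simp only [hcnt]
        have hpops : pvPops (c :: r) = pvPops r := by simp [pvPops, hp, hq]
        rw [hpops]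
        have h2 : ∀ p : List Char, ((p.count ')' + if c == ')' then 1 else 0 : Nat) : Int)
            - ((p.count '(' + if c == '(' then 1 else 0 : Nat) : Int)
            = (p.count ')' : Int) - p.count '(' := by
          intro p
          rw [if_neg (by simpa using hq), if_neg (by simpa using hp)]
          push_cast; ring
        simp only [h2]
        have := ih k
        constructor
        · intro h
          refine ⟨by simpa using (by omega : (0:Int) ≤ k), fun p hp => this.1 h p hp⟩
        · rintro ⟨h0, hall⟩
          exact this.2 hall

theorem pvRegSelf (cs : List Char) (h : pvHU cs = false) : pvReg cs = cs := by
  induction cs with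
  | nil => rfl
  | cons c r ih =>
    simp only [pvHU, Bool.or_eq_false_iff] at h
    simp [pvReg, h.1, h.2]

theorem pvNC (r : List Char) : pvNeverClosed r = true ↔ pvPops r = 0 := by
  simp only [pvNeverClosed, decide_eq_true_eq]
  constructor
  · intro hall
    have := (pvPP r 0).2 (fun p hp => by have := hall p hp; omega)
    omega
  · intro h0 p hp
    have := (pvPP r 0).1 (by omega) p hp
    omega

theorem pvAChar (s : String) (h : Pre_parse_nested_structure s) :
    parse_nested_structure s = (pvEnc (pvTot (pvReg s.toList))).items := by
  have hpops : pvPops s.toList = 0 := by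
    have := (pvPP s.toList 0).2 (fun p hp => by have := h p hp; omega)
    omega
  have hb : pvLoopA s.toList [] PySem.Dict.empty = (pvG s.toList [] none).map pvEnc := by
    have := pvBridge s.toList [] none
    simpa using this
  rw [pvMain s.toList [] none (by simp [hpops])] at hb
  unfold parse_nested_structure
  rw [hb]
  cases hhu : pvHU s.toList with
  | true => simp [hhu]
  | false =>
    rw [pvRegSelf s.toList hhu]
    simp only [hhu, if_false, Bool.false_eq_true, hpops]
    have h1 : pvSfold (List.take (0 + 1) (none :: [])) = none := rfl
    rw [h1, pvComb_none_left]
    rfl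

theorem pvN1 (cs : List Char) (h : pvHU cs = true) : pvGoD cs true = true := by
  induction cs with
  | nil => simp [pvHU] at h
  | cons c r ih =>
    simp only [pvHU, Bool.or_eq_true, Bool.and_eq_true, beq_iff_eq] at h
    simp only [pvGoD, Bool.or_eq_true]
    rcases h with ⟨hc, hz⟩ | hr
    · left
      simp [hc, (pvNC r).2 (by simpa using hz)]
    · right
      simp [ih hr]

theorem pvMW (c : Char) : pvMapped c = false ↔ pvWgt c = none := by
  by_cases h1 : c = 'H'; · subst h1; decide
  by_cases h2 : c = 'Q'; · subst h2; decide
  by_cases h3 : c = 'N'; · subst h3; decide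
  by_cases h4 : c = 'J'; · subst h4; decide
  by_cases h5 : c = 'F'; · subst h5; decide
  by_cases h6 : c = 'A'; · subst h6; decide
  by_cases h7 : c = 'G'; · subst h7; decide
  by_cases h8 : c = 'X'; · subst h8; decide
  have hm : pvMapped c = false := by
    simp [pvMapped, h1, h2, h3, h4, h5, h6, h7, h8]
  have hw : pvWgt c = none := by
    simp [pvWgt, h1, h2, h3, h4, h5, h6, h7, h8]
  simp [hm, hw]

theorem pvN2 (cs : List Char) : ∀ seen, pvGoD cs seen = false → pvTot (pvReg cs) = pvTot cs := by
  induction cs with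
  | nil => intro seen _; rfl
  | cons c r ih =>
    intro seen h
    simp only [pvGoD, Bool.or_eq_false_iff] at h
    obtain ⟨h1, h2⟩ := h
    by_cases hu : pvHU r = true
    · have hm : pvMapped c = false := by
        by_contra hm
        rw [Bool.not_eq_false] at hm
        rw [hm, Bool.or_true] at h2
        exact absurd (pvN1 r hu) (by simp [h2])
      have hw : pvWgt c = none := (pvMW c).1 hm
      have hreg : pvReg (c :: r) = pvReg r := by simp [pvReg, hu]
      have htot : pvTot (c :: r) = pvTot r := by simp [pvTot, hw, pvComb_none_left]
      rw [hreg, htot]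
      exact ih _ h2
    · rw [Bool.not_eq_true] at hu
      by_cases hz : (c == '(' && pvPops r == 0) = true
      · have hc : c = '(' := by simp at hz; exact hz.1
        have hreg : pvReg (c :: r) = r := by simp [pvReg, hu, hz]
        have htot : pvTot (c :: r) = pvTot r := by
          subst hc
          simp [pvTot, show pvWgt '(' = none from by decide, pvComb_none_left]
        rw [hreg, htot]
      · have hreg : pvReg (c :: r) = c :: r := by
          simp only [pvReg, hu, if_false, Bool.false_eq_true, hz]
        rw [hreg]

-- ===== B side =====
def pvAbsB : List ((Int × Int × Int × Int) × Int) → Option (Int × Int × Int × Int) →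
    Option (Int × Int × Int × Int)
  | [], q => q
  | (wq, n) :: rest, q => pvAbsB rest (if n ≠ 0 then pvComb q (some (pvQsmul n wq)) else q)

def pvSumQ (l : List ((Int × Int × Int × Int) × Int)) : Int × Int × Int × Int :=
  (l.map (fun p => pvQsmul p.2 p.1)).foldr pvQadd pvQzero

def pvMkT (h q n j f a g x : Nat) : Option (Int × Int × Int × Int) :=
  if h = 0 ∧ q = 0 ∧ n = 0 ∧ j = 0 ∧ f = 0 ∧ a = 0 ∧ g = 0 ∧ x = 0 then none
  else some (6*h + 6*q + 8*n + 8*j + 6*f + 11*a + 11*g + 5*x,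
             10*h + 10*q + 13*n + 13*j + 10*f + 17*a + 17*g + 8*x,
             5*h + 5*q + 5*n + 5*j + 4*f + 8*a + 9*g + 4*x,
             (n : Int) + j + a + g)

theorem pvGoSingle (c : Char) : ∀ (fuel : Nat) (l : List Char) (acc : Nat), l.length ≤ fuel →
    PySem.Chars.count.go [c] fuel l acc = acc + l.count c := by
  intro fuel
  induction fuel with
  | zero =>
    intro l acc h
    have : l = [] := List.eq_nil_of_length_eq_zero (by omega)
    subst this
    simp [PySem.Chars.count.go]
  | succ f ih =>
    intro l acc h
    cases l with
    | nil => simp [PySem.Chars.count.go]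
    | cons a t =>
      rw [PySem.Chars.count.go]
      by_cases hac : a = c
      · subst hac
        rw [if_pos (by simp [List.isPrefixOf])]
        simp only [List.length_cons] at h
        have hd : List.drop ([a] : List Char).length (a :: t) = t := by simp
        rw [hd, ih t (acc + 1) (by omega)]
        simp [List.count_cons]
        omega
      · rw [if_neg (by simp [List.isPrefixOf]; exact fun hh => hac hh.symm)]
        rw [ih t acc (by simpa using h)]
        simp [List.count_cons]
        intro hh
        exact absurd hh hac

theorem pvCountChar (s : String) (sub : String) (c : Char) (h : sub.toList = [c]) :
    PySem.Str.count s sub = s.toList.count c := by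
  rw [show PySem.Str.count s sub = PySem.Chars.count s.toList sub.toList from by simp]
  rw [h]
  rw [show PySem.Chars.count s.toList [c]
      = PySem.Chars.count.go [c] s.toList.length s.toList 0 from by
    simp [PySem.Chars.count]]
  rw [pvGoSingle c s.toList.length s.toList 0 le_rfl]
  omega

theorem pvAddB (q : Option (Int × Int × Int × Int)) (y : Int × Int × Int × Int) (n : Int) :
    List.foldl (fun d p => d.insert p.1 (d.getD p.1 0 + p.2 * n)) (pvEnc q) (pvItemsOf y)
      = pvEnc (some (pvQadd (q.getD pvQzero) (pvQsmul n y))) := by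
  obtain ⟨y1, y2, y3, y4⟩ := y
  cases q with
  | none =>
    simp [pvItemsOf, pvEnc, pvQadd, pvQzero, pvQsmul, PySem.Dict.insert, PySem.Dict.getD,
      PySem.Dict.get?, PySem.Dict.contains, PySem.Dict.empty, List.foldl]
  | some q0 =>
    obtain ⟨a, b, c, d⟩ := q0
    simp [pvItemsOf, pvEnc, pvQadd, pvQzero, pvQsmul, PySem.Dict.insert, PySem.Dict.getD,
      PySem.Dict.get?, PySem.Dict.contains, List.foldl]

theorem pvStepB (s1 : String) (s : String) (q : Option (Int × Int × Int × Int))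
    (y : Int × Int × Int × Int) :
    (if (PySem.Str.count s s1 : Int) ≠ 0
      then (pvItemsOf y).foldl
        (fun d p => d.insert p.1 (d.getD p.1 0 + p.2 * (PySem.Str.count s s1 : Int))) (pvEnc q)
      else pvEnc q)
    = pvEnc (if (PySem.Str.count s s1 : Int) ≠ 0
        then pvComb q (some (pvQsmul (PySem.Str.count s s1 : Int) y)) else q) := by
  split_ifs with hn
  · rw [pvAddB, pvComb_some_right]
  · rfl

theorem pvFoldB (s : String) : ∀ (l : List (String × List (String × Int)))
    (qs : List ((Int × Int × Int × Int) × Int)) (q : Option (Int × Int × Int × Int)),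
    l.map Prod.snd = qs.map (fun p => pvItemsOf p.1) →
    l.map (fun sa => (PySem.Str.count s sa.1 : Int)) = qs.map Prod.snd →
    l.foldl (fun res sa =>
      let n : Int := (PySem.Str.count s sa.1 : Int)
      if n ≠ 0 then sa.2.foldl (fun d p => d.insert p.1 (d.getD p.1 0 + p.2 * n)) res
      else res) (pvEnc q) = pvEnc (pvAbsB qs q) := by
  intro l
  induction l with
  | nil =>
    intro qs q hl _
    cases qs with
    | nil => rfl
    | cons p ps => simp at hl
  | cons sa rest ih =>
    intro qs q hl hn
    cases qs with
    | nil => simp at hl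
    | cons p ps =>
      obtain ⟨s1, items⟩ := sa
      simp only [List.map_cons, List.cons.injEq] at hl hn
      rw [List.foldl_cons]
      have h1 : items = pvItemsOf p.1 := hl.1
      subst h1
      dsimp only
      rw [pvStepB s1 s q p.1]
      rw [ih ps _ hl.2 hn.2]
      congr 1
      simp only [pvAbsB]
      obtain ⟨w, n⟩ := p
      simp only at hn ⊢
      rw [hn.1]

theorem pvQadd_zero_left (y : Int × Int × Int × Int) : pvQadd pvQzero y = y := by
  simp [pvQadd, pvQzero]

theorem pvQadd_zero_right (y : Int × Int × Int × Int) : pvQadd y pvQzero = y := by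
  simp [pvQadd, pvQzero]

theorem pvQsmul_zero (y : Int × Int × Int × Int) : pvQsmul 0 y = pvQzero := by
  simp [pvQsmul, pvQzero]

theorem pvSumQ_cons (w : Int × Int × Int × Int) (n : Int) (rest) :
    pvSumQ ((w, n) :: rest) = pvQadd (pvQsmul n w) (pvSumQ rest) := rfl

theorem pvSumQ_zero : ∀ l, l.all (fun p => p.2 == 0) = true → pvSumQ l = pvQzero := by
  intro l
  induction l with
  | nil => intro _; rfl
  | cons p rest ih =>
    intro h
    simp only [List.all_cons, Bool.and_eq_true, beq_iff_eq] at h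
    obtain ⟨w, n⟩ := p
    simp only at h
    rw [pvSumQ_cons, h.1, pvQsmul_zero, pvQadd_zero_left, ih h.2]

theorem pvAbsB_spec : ∀ (l : List ((Int × Int × Int × Int) × Int)) q,
    pvAbsB l q = if l.all (fun p => p.2 == 0) = true then q
      else pvComb q (some (pvSumQ l)) := by
  intro l
  induction l with
  | nil => intro q; simp [pvAbsB]
  | cons p rest ih =>
    intro q
    obtain ⟨w, n⟩ := p
    rw [show pvAbsB ((w, n) :: rest) q
        = pvAbsB rest (if n ≠ 0 then pvComb q (some (pvQsmul n w)) else q) from rfl]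
    have hall_eq : (((w, n) :: rest).all (fun p => p.2 == 0))
        = ((n == 0) && rest.all (fun p => p.2 == 0)) := by simp [List.all_cons]
    by_cases hn : n = 0
    · subst hn
      rw [if_neg (show ¬((0 : Int) ≠ 0) by simp), ih, hall_eq]
      simp only [beq_self_eq_true, Bool.true_and, pvSumQ_cons, pvQsmul_zero, pvQadd_zero_left]
    · rw [if_pos hn, ih, hall_eq, show (n == 0) = false from by simpa using hn, Bool.false_and,
          if_neg (show ¬(false = true) by simp), pvSumQ_cons]
      by_cases hall : rest.all (fun p => p.2 == 0) = true
      · rw [if_pos hall, pvSumQ_zero rest hall, pvQadd_zero_right]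
      · rw [if_neg hall, pvComb_assoc]
        rfl

theorem pvAbsB_mkT (h q n j f a g x : Nat) :
    pvAbsB [((6,10,5,0),(h:Int)), ((6,10,5,0),(q:Int)), ((8,13,5,1),(n:Int)),
            ((8,13,5,1),(j:Int)), ((6,10,4,0),(f:Int)), ((11,17,8,1),(a:Int)),
            ((11,17,9,1),(g:Int)), ((5,8,4,0),(x:Int))] none
      = pvMkT h q n j f a g x := by
  rw [pvAbsB_spec]
  unfold pvMkT
  split_ifs with h1 h2 h3
  · rfl
  · simp only [List.all_cons, List.all_nil, Bool.and_eq_true, beq_iff_eq] at h1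
    exfalso; apply h2
    push_cast at h1
    omega
  · simp only [List.all_cons, List.all_nil, Bool.and_eq_true, beq_iff_eq] at h1
    exfalso; apply h1
    refine ⟨by simp [h3.1], by simp [h3.2.1], by simp [h3.2.2.1], by simp [h3.2.2.2.1],
      by simp [h3.2.2.2.2.1], by simp [h3.2.2.2.2.2.1], by simp [h3.2.2.2.2.2.2.1],
      by simp [h3.2.2.2.2.2.2.2], trivial⟩
  · rw [pvComb_none_left]
    simp only [pvSumQ, List.map_cons, List.map_nil, List.foldr_cons, List.foldr_nil,
      pvQsmul, pvQadd, pvQzero]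
    simp only [Option.some.injEq, Prod.ext_iff]
    refine ⟨by push_cast; ring, by push_cast; ring, by push_cast; ring, by push_cast; ring⟩

theorem pvBumpH (h q n j f a g x : Nat) :
    pvComb (some (6,10,5,0)) (pvMkT h q n j f a g x) = pvMkT (h+1) q n j f a g x := by
  unfold pvMkT
  split_ifs with h1 h2 <;> simp_all [pvComb, pvQadd, Prod.ext_iff] <;> push_cast <;> omega

theorem pvBumpQ (h q n j f a g x : Nat) :
    pvComb (some (6,10,5,0)) (pvMkT h q n j f a g x) = pvMkT h (q+1) n j f a g x := by
  unfold pvMkT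
  split_ifs with h1 h2 <;> simp_all [pvComb, pvQadd, Prod.ext_iff] <;> push_cast <;> omega

theorem pvBumpN (h q n j f a g x : Nat) :
    pvComb (some (8,13,5,1)) (pvMkT h q n j f a g x) = pvMkT h q (n+1) j f a g x := by
  unfold pvMkT
  split_ifs with h1 h2 <;> simp_all [pvComb, pvQadd, Prod.ext_iff] <;> push_cast <;> omega

theorem pvBumpJ (h q n j f a g x : Nat) :
    pvComb (some (8,13,5,1)) (pvMkT h q n j f a g x) = pvMkT h q n (j+1) f a g x := by
  unfold pvMkT
  split_ifs with h1 h2 <;> simp_all [pvComb, pvQadd, Prod.ext_iff] <;> push_cast <;> omega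

theorem pvBumpF (h q n j f a g x : Nat) :
    pvComb (some (6,10,4,0)) (pvMkT h q n j f a g x) = pvMkT h q n j (f+1) a g x := by
  unfold pvMkT
  split_ifs with h1 h2 <;> simp_all [pvComb, pvQadd, Prod.ext_iff] <;> push_cast <;> omega

theorem pvBumpA (h q n j f a g x : Nat) :
    pvComb (some (11,17,8,1)) (pvMkT h q n j f a g x) = pvMkT h q n j f (a+1) g x := by
  unfold pvMkT
  split_ifs with h1 h2 <;> simp_all [pvComb, pvQadd, Prod.ext_iff] <;> push_cast <;> omega

theorem pvBumpG (h q n j f a g x : Nat) :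
    pvComb (some (11,17,9,1)) (pvMkT h q n j f a g x) = pvMkT h q n j f a (g+1) x := by
  unfold pvMkT
  split_ifs with h1 h2 <;> simp_all [pvComb, pvQadd, Prod.ext_iff] <;> push_cast <;> omega

theorem pvBumpX (h q n j f a g x : Nat) :
    pvComb (some (5,8,4,0)) (pvMkT h q n j f a g x) = pvMkT h q n j f a g (x+1) := by
  unfold pvMkT
  split_ifs with h1 h2 <;> simp_all [pvComb, pvQadd, Prod.ext_iff] <;> push_cast <;> omega

theorem pvLemT (cs : List Char) : pvTot cs = pvMkT (cs.count 'H') (cs.count 'Q')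
    (cs.count 'N') (cs.count 'J') (cs.count 'F') (cs.count 'A') (cs.count 'G') (cs.count 'X') := by
  induction cs with
  | nil => simp [pvTot, pvMkT]
  | cons c r ih =>
    rw [show pvTot (c :: r) = pvComb (pvWgt c) (pvTot r) from by simp [pvTot]]
    rw [ih]
    by_cases e1 : c = 'H'
    · subst e1; simp only [List.count_cons]; simp; rw [← pvBumpH]; rfl
    · by_cases e2 : c = 'Q'
      · subst e2; simp only [List.count_cons]; simp; rw [← pvBumpQ]; rfl
      · by_cases e3 : c = 'N'
        · subst e3; simp only [List.count_cons]; simp; rw [← pvBumpN]; rfl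
        · by_cases e4 : c = 'J'
          · subst e4; simp only [List.count_cons]; simp; rw [← pvBumpJ]; rfl
          · by_cases e5 : c = 'F'
            · subst e5; simp only [List.count_cons]; simp; rw [← pvBumpF]; rfl
            · by_cases e6 : c = 'A'
              · subst e6; simp only [List.count_cons]; simp; rw [← pvBumpA]; rfl
              · by_cases e7 : c = 'G'
                · subst e7; simp only [List.count_cons]; simp; rw [← pvBumpG]; rfl
                · by_cases e8 : c = 'X'
                  · subst e8; simp only [List.count_cons]; simp; rw [← pvBumpX]; rfl
                  · have hw : pvWgt c = none := by
                      simp [pvWgt, e1, e2, e3, e4, e5, e6, e7, e8]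
                    have hcnt : ∀ x : Char, ¬ c = x → List.count x (c :: r) = List.count x r := by
                      intro x hx
                      rw [List.count_cons, if_neg (by simpa using hx),
                        Nat.add_zero]
                    rw [hw, pvComb_none_left,
                      hcnt 'H' e1, hcnt 'Q' e2, hcnt 'N' e3, hcnt 'J' e4, hcnt 'F' e5,
                      hcnt 'A' e6, hcnt 'G' e7, hcnt 'X' e8]

theorem pvBChar (s : String) :
    parse_nested_structure_alt s = (pvEnc (pvTot s.toList)).items := by
  unfold parse_nested_structure_alt pvBMapping
  rw [show (PySem.Dict.empty : PySem.Dict String Int) = pvEnc none from rfl]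
  rw [pvFoldB s _
    [((6,10,5,0), (PySem.Str.count s "H" : Int)), ((6,10,5,0), (PySem.Str.count s "Q" : Int)),
     ((8,13,5,1), (PySem.Str.count s "N" : Int)), ((8,13,5,1), (PySem.Str.count s "J" : Int)),
     ((6,10,4,0), (PySem.Str.count s "F" : Int)), ((11,17,8,1), (PySem.Str.count s "A" : Int)),
     ((11,17,9,1), (PySem.Str.count s "G" : Int)), ((5,8,4,0), (PySem.Str.count s "X" : Int))]
    none (by simp [pvItemsOf]) (by simp)]
  rw [pvCountChar s "H" 'H' (by decide), pvCountChar s "Q" 'Q' (by decide),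
      pvCountChar s "N" 'N' (by decide), pvCountChar s "J" 'J' (by decide),
      pvCountChar s "F" 'F' (by decide), pvCountChar s "A" 'A' (by decide),
      pvCountChar s "G" 'G' (by decide), pvCountChar s "X" 'X' (by decide)]
  rw [pvAbsB_mkT, ← pvLemT]

-- ===== tightness =====
def pvCW (c : Char) : Int := match pvWgt c with | none => 0 | some y => y.1
def pvCSum (cs : List Char) : Int := (cs.map pvCW).sum

theorem pvCW_nonneg (c : Char) : 0 ≤ pvCW c := by
  unfold pvCW pvWgt
  split_ifs <;> simp

theorem pvCW_pos (c : Char) (h : pvMapped c = true) : 5 ≤ pvCW c := by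
  simp only [pvMapped, List.contains_eq_mem, List.mem_cons, decide_eq_true_eq,
    List.not_mem_nil, or_false] at h
  rcases h with rfl | rfl | rfl | rfl | rfl | rfl | rfl | rfl <;> decide

theorem pvCSum_cons (c : Char) (r : List Char) : pvCSum (c :: r) = pvCW c + pvCSum r := by
  simp [pvCSum]

theorem pvCSum_nonneg (cs : List Char) : 0 ≤ pvCSum cs := by
  induction cs with
  | nil => simp [pvCSum]
  | cons c r ih => rw [pvCSum_cons]; have := pvCW_nonneg c; omega

theorem pvCR (cs : List Char) : pvCSum (pvReg cs) ≤ pvCSum cs := by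
  induction cs with
  | nil => simp [pvReg]
  | cons c r ih =>
    have hc := pvCW_nonneg c
    simp only [pvReg]
    split_ifs with h1 h2
    · rw [pvCSum_cons]; omega
    · rw [pvCSum_cons]; omega
    · omega

theorem pvGD_hU (cs : List Char) : ∀ seen, pvGoD cs seen = true → pvHU cs = true := by
  induction cs with
  | nil => intro seen h; simp [pvGoD] at h
  | cons c r ih =>
    intro seen h
    simp only [pvGoD, Bool.or_eq_true, Bool.and_eq_true, beq_iff_eq] at h
    simp only [pvHU, Bool.or_eq_true, Bool.and_eq_true, beq_iff_eq]
    rcases h with ⟨⟨hc, _⟩, hnc⟩ | hr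
    · exact Or.inl ⟨hc, by simp [(pvNC r).1 hnc]⟩
    · exact Or.inr (ih _ hr)

theorem pvT1 (cs : List Char) : ∀ seen, pvGoD cs seen = true →
    (seen = false → pvCSum (pvReg cs) < pvCSum cs) := by
  induction cs with
  | nil => intro seen h; simp [pvGoD] at h
  | cons c r ih =>
    intro seen h hs
    subst hs
    simp only [pvGoD, Bool.or_eq_true, Bool.and_eq_true, beq_iff_eq] at h
    rcases h with ⟨⟨_, hfalse⟩, _⟩ | hr
    · cases hfalse
    · have hu : pvHU r = true := pvGD_hU r _ hr
      have hreg : pvReg (c :: r) = pvReg r := by simp [pvReg, hu]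
      rw [hreg, pvCSum_cons]
      by_cases hm : pvMapped c = true
      · have h5 := pvCW_pos c hm
        have := pvCR r
        omega
      · rw [Bool.not_eq_true] at hm
        rw [hm, Bool.or_false] at hr
        have := ih false hr rfl
        have hc := pvCW_nonneg c
        omega

theorem pvTC (cs : List Char) : (pvTot cs).elim (pvCSum cs = 0) (fun y => y.1 = pvCSum cs) := by
  induction cs with
  | nil => simp [pvTot, pvCSum]
  | cons c r ih =>
    have hcw : pvCW c = (pvWgt c).elim 0 (fun y => y.1) := by
      unfold pvCW; cases pvWgt c <;> rfl
    rw [show pvTot (c :: r) = pvComb (pvWgt c) (pvTot r) from by simp [pvTot]]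
    cases hw : pvWgt c <;> cases ht : pvTot r <;>
      rw [hw] at hcw <;> rw [ht] at ih <;>
      simp only [Option.elim] at hcw ih ⊢ <;>
      simp [pvComb, pvQadd, pvCSum_cons, hcw, ih] <;>
      omega

-- ===== VERDICT (by name: the statement is the Claim_ definition above) =====
theorem parse_nested_structure_spec : Claim_unchanged_parse_nested_structure := by
  intro s _ hpre
  intro hnd
  rw [pvAChar s hpre, pvBChar s]
  have hgd : pvGoD s.toList false = false := by
    rw [← Bool.not_eq_true]
    exact fun hh => hnd hh
  rw [pvN2 s.toList false hgd]

theorem parse_nested_structure_changed : Claim_changed_parse_nested_structure := by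
  unfold Claim_changed_parse_nested_structure; refine ⟨by decide, by decide, by decide, by decide, by decide, by decide⟩

theorem parse_nested_structure_tight : Claim_exact_parse_nested_structure := by
  intro s _ hpre hd heq
  rw [pvAChar s hpre, pvBChar s] at heq
  have hlt : pvCSum (pvReg s.toList) < pvCSum s.toList := pvT1 s.toList false hd rfl
  have t1 := pvTC (pvReg s.toList)
  have t2 := pvTC s.toList
  cases h1 : pvTot (pvReg s.toList) with
  | none =>
    rw [h1] at t1 heq
    simp only [Option.elim] at t1
    cases h2 : pvTot s.toList with
    | none =>
      rw [h2] at t2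
      simp only [Option.elim] at t2
      omega
    | some y2 =>
      rw [h2] at heq
      simp [pvEnc, pvItemsOf, PySem.Dict.empty] at heq
  | some y1 =>
    rw [h1] at t1 heq
    simp only [Option.elim] at t1
    cases h2 : pvTot s.toList with
    | none =>
      rw [h2] at t2
      simp only [Option.elim] at t2
      have := pvCSum_nonneg (pvReg s.toList)
      omega
    | some y2 =>
      rw [h2] at t2
      simp only [Option.elim] at t2
      rw [h2] at heq
      simp only [pvEnc, pvItemsOf] at heq
      have : y1.1 = y2.1 := by
        have := congrArg (fun l => l.head?) heq
        simpa using this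
      omega
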